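-- pv_equiv track=rewrite | github.com/every-algorithm/python | search/approximate_string-matching_algorithm.py | approx_match
-- ===== SOURCE A (Python) =====
-- def approx_match(text, pattern, max_dist):
--     n = len(text)
--     m = len(pattern)
--     matches = []
--     for i in range(n - m + 1):
--         segment = text[i:i + m]
--         dist = edit_distance(segment, pattern, max_dist)
--         if dist <= max_dist:
--             matches.append(i)
--     return matches
--
-- def edit_distance(s, t, max_dist):
--     len_s = len(s)
--     len_t = len(t)
--     dp = [[0] * (len_t + 1) for _ in range(len_s + 1)]
--     for i in range(len_s + 1):
--         dp[i][0] = i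
--     for j in range(len_t + 1):
--         dp[0][j] = len_s
--     for i in range(1, len_s + 1):
--         for j in range(1, len_t + 1):
--             if s[i - 1] == t[j - 1]:
--                 cost = 1
--             else:
--                 cost = 0
--             dp[i][j] = min(dp[i - 1][j] + 1,      # deletion
--                            dp[i][j - 1] + 1,      # insertion
--                            dp[i - 1][j - 1] + cost)  # substitution
--     return dp[len_s][len_t]
-- ===== SOURCE B (Python) =====
-- def approx_match(text, pattern, max_dist):
--     m = len(pattern)
--     return [i for i in range(len(text) - m + 1)
--             if _dist(text[i:i + m], pattern) <= max_dist]
--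
-- def _dist(s, t):
--     len_s = len(s)
--     memo = {}
--     def f(i, j):
--         v = memo.get((i, j))
--         if v is not None:
--             return v
--         if i == 0:
--             v = len_s
--         elif j == 0:
--             v = i
--         else:
--             cost = 1 if s[i - 1] == t[j - 1] else 0
--             v = min(f(i - 1, j) + 1, f(i, j - 1) + 1, f(i - 1, j - 1) + cost)
--         memo[(i, j)] = v
--         return v
--     return f(len_s, len(t))
-- ===== Notes on version B (the rewrite author's own statement) =====
-- stated objective: alternative
-- what changed: B replaces A's bottom-up 2D edit-distance table (nested index loops filling dp[i][j]) with a top-down memoized recursion f(i,j) over a dict, and A's append-loop over window starts with a list comprehension.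
import Mathlib
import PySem

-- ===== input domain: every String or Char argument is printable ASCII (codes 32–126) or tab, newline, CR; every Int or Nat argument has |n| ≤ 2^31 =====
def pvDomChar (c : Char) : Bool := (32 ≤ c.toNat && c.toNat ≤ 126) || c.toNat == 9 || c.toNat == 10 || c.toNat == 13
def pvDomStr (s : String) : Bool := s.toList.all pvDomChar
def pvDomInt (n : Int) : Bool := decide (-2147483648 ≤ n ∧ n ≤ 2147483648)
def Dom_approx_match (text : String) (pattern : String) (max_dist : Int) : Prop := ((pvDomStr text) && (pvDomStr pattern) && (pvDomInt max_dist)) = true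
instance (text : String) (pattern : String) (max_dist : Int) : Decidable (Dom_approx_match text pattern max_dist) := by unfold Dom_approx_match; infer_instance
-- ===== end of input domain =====

-- B replaces A's bottom-up 2D edit-distance table with a top-down memoized recursion
-- (dict memo, call-stack driven) and A's append-loop with a filter comprehension;
-- objective: alternative decomposition, same asymptotic cost.

-- ===== PORT A =====
-- dp[i][j] reads/writes: indices are provably in range in A, so getD/set are exact.
def pvGet2 (dp : List (List Int)) (i j : Nat) : Int := (dp.getD i []).getD j 0

def pvSet2 (dp : List (List Int)) (i j : Nat) (v : Int) : List (List Int) :=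
  dp.set i ((dp.getD i []).set j v)

def edit_distance (s t : List Char) (max_dist : Int) : Int :=
  let len_s := s.length
  let len_t := t.length
  let dp0 := List.replicate (len_s + 1) (List.replicate (len_t + 1) (0 : Int))
  let dp1 := (List.range (len_s + 1)).foldl (fun dp i => pvSet2 dp i 0 (i : Int)) dp0
  let dp2 := (List.range (len_t + 1)).foldl (fun dp j => pvSet2 dp 0 j (len_s : Int)) dp1
  let dp3 := (List.range' 1 len_s).foldl (fun dp i =>
    (List.range' 1 len_t).foldl (fun dp j =>
      let cost : Int := if s.getD (i - 1) ' ' = t.getD (j - 1) ' ' then 1 else 0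
      pvSet2 dp i j (min (min (pvGet2 dp (i - 1) j + 1) (pvGet2 dp i (j - 1) + 1))
        (pvGet2 dp (i - 1) (j - 1) + cost))) dp) dp2
  pvGet2 dp3 len_s len_t

def approx_match (text : String) (pattern : String) (max_dist : Int) : List Int :=
  let tl := text.toList
  let pl := pattern.toList
  let n := tl.length
  let m := pl.length
  (List.range (n + 1 - m)).foldl (fun acc i =>
    let segment := PySem.List.slice tl (some (i : Int)) (some ((i : Int) + (m : Int)))
    let dist := edit_distance segment pl max_dist
    if dist ≤ max_dist then acc ++ [(i : Int)] else acc) []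

-- ===== PORT B =====
-- top-down f(i, j) with a dict memo threaded through the recursive calls
def pvDistF (s t : List Char) (len_s : Nat) :
    Nat → Nat → PySem.Dict (Nat × Nat) Int → Int × PySem.Dict (Nat × Nat) Int
  | i, j, memo =>
    match memo.get? (i, j) with
    | some v => (v, memo)
    | none =>
      if i = 0 then ((len_s : Int), memo.insert (i, j) (len_s : Int))
      else if j = 0 then ((i : Int), memo.insert (i, j) (i : Int))
      else
        let r1 := pvDistF s t len_s (i - 1) j memo
        let r2 := pvDistF s t len_s i (j - 1) r1.2
        let r3 := pvDistF s t len_s (i - 1) (j - 1) r2.2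
        let cost : Int := if s.getD (i - 1) ' ' = t.getD (j - 1) ' ' then 1 else 0
        let v := min (min (r1.1 + 1) (r2.1 + 1)) (r3.1 + cost)
        (v, r3.2.insert (i, j) v)
  termination_by i j _ => (i, j)

def pvDist (s t : List Char) : Int :=
  (pvDistF s t s.length s.length t.length PySem.Dict.empty).1

def approx_match_alt (text : String) (pattern : String) (max_dist : Int) : List Int :=
  let tl := text.toList
  let pl := pattern.toList
  let m := pl.length
  ((List.range (tl.length + 1 - m)).filter (fun i =>
      decide (pvDist (PySem.List.slice tl (some (i : Int)) (some ((i : Int) + (m : Int)))) pl ≤ max_dist))).map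
    (fun i => (i : Int))

-- ===== PRECONDITION & SPEC =====
def Spec_approx_match (text : String) (pattern : String) (max_dist : Int) (out : List Int) : Prop := out = approx_match_alt text pattern max_dist
instance (text : String) (pattern : String) (max_dist : Int) (out : List Int) : Decidable (Spec_approx_match text pattern max_dist out) := by unfold Spec_approx_match; infer_instance

-- ===== CLAIM (what is proved, stated in full; the proofs are below) =====
def Claim_equal_approx_match : Prop := ∀ (text : String) (pattern : String) (max_dist : Int), Dom_approx_match text pattern max_dist → Spec_approx_match text pattern max_dist (approx_match text pattern max_dist)

-- ===== LEMMAS AND PROOFS =====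

-- mathematical recurrence both ports compute
def pvD (s t : List Char) : Nat → Nat → Int
  | 0, _ => (s.length : Int)
  | i + 1, 0 => (i + 1 : Nat)
  | i + 1, j + 1 =>
    let cost : Int := if s.getD i ' ' = t.getD j ' ' then 1 else 0
    min (min (pvD s t i (j + 1) + 1) (pvD s t (i + 1) j + 1)) (pvD s t i j + cost)
  termination_by i j => (i, j)

-- ----- B side -----
def pvMemoOK (s t : List Char) (memo : PySem.Dict (Nat × Nat) Int) : Prop :=
  ∀ i j v, memo.get? (i, j) = some v → v = pvD s t i j

theorem pvMemoOK_insert {s t : List Char} {memo : PySem.Dict (Nat × Nat) Int} {i j : Nat} {v : Int}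
    (hm : pvMemoOK s t memo) (hv : v = pvD s t i j) : pvMemoOK s t (memo.insert (i, j) v) := by
  intro i' j' w hw
  rw [PySem.Dict.get?_insert] at hw
  split at hw
  · next heq =>
    obtain ⟨rfl, rfl⟩ : i' = i ∧ j' = j := by simpa [Prod.ext_iff] using heq
    cases hw; exact hv
  · exact hm i' j' w hw

theorem pvDistF_spec (s t : List Char) :
    ∀ n i j memo, i + j ≤ n → pvMemoOK s t memo →
      (pvDistF s t s.length i j memo).1 = pvD s t i j ∧
      pvMemoOK s t (pvDistF s t s.length i j memo).2 := by
  intro n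
  induction n using Nat.strong_induction_on with
  | _ n ih =>
    intro i j memo hle hm
    rw [pvDistF]
    cases hget : memo.get? (i, j) with
    | some v => simpa using ⟨hm i j v hget, hm⟩
    | none =>
      by_cases hi : i = 0
      · subst hi
        simp only [if_pos]
        exact ⟨by simp [pvD], pvMemoOK_insert hm (by simp [pvD])⟩
      · by_cases hj : j = 0
        · subst hj
          obtain ⟨i', rfl⟩ := Nat.exists_eq_succ_of_ne_zero hi
          simp only [if_neg hi, if_pos]
          exact ⟨by simp [pvD], pvMemoOK_insert hm (by simp [pvD])⟩
        · obtain ⟨i', rfl⟩ := Nat.exists_eq_succ_of_ne_zero hi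
          obtain ⟨j', rfl⟩ := Nat.exists_eq_succ_of_ne_zero hj
          simp only [if_neg hi, if_neg hj]
          obtain ⟨h1, hm1⟩ := ih (n - 1) (by omega) (i' + 1 - 1) (j' + 1) memo (by omega) hm
          obtain ⟨h2, hm2⟩ := ih (n - 1) (by omega) (i' + 1) (j' + 1 - 1) _ (by omega) hm1
          obtain ⟨h3, hm3⟩ := ih (n - 1) (by omega) (i' + 1 - 1) (j' + 1 - 1) _ (by omega) hm2
          simp only [Nat.add_sub_cancel] at h1 h2 h3 hm1 hm2 hm3
          simp only [Nat.succ_sub_one]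
          constructor
          · rw [h1, h2, h3]
            conv_rhs => rw [pvD]
            rfl
          · refine pvMemoOK_insert hm3 ?_
            rw [h1, h2, h3]
            conv_rhs => rw [pvD]
            rfl

theorem pvDist_eq (s t : List Char) : pvDist s t = pvD s t s.length t.length := by
  exact (pvDistF_spec s t (s.length + t.length) s.length t.length PySem.Dict.empty le_rfl
    (fun i j v h => by simp [PySem.Dict.get?_empty] at h)).1

-- ----- A side -----
def pvShape (m k : Nat) (dp : List (List Int)) : Prop :=
  dp.length = m + 1 ∧ ∀ r ∈ dp, r.length = k + 1

theorem pvGetD_set_self {α : Type} (l : List α) (i : Nat) (a d : α) (h : i < l.length) :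
    (l.set i a).getD i d = a := by
  simp [List.getD_eq_getElem?_getD, List.getElem?_set_self h]

theorem pvGetD_set_ne {α : Type} (l : List α) {i j : Nat} (a d : α) (h : i ≠ j) :
    (l.set i a).getD j d = l.getD j d := by
  simp [List.getD_eq_getElem?_getD, List.getElem?_set_ne h]

theorem pvRow_len {m k : Nat} {dp : List (List Int)} (h : pvShape m k dp) {i : Nat}
    (hi : i ≤ m) : (dp.getD i []).length = k + 1 := by
  have hlt : i < dp.length := by rw [h.1]; omega
  rw [List.getD_eq_getElem?_getD, List.getElem?_eq_getElem hlt]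
  exact h.2 _ (List.getElem_mem hlt)

theorem pvShape_set {m k : Nat} {dp : List (List Int)} (h : pvShape m k dp) {i : Nat}
    (hi : i ≤ m) (j : Nat) (v : Int) : pvShape m k (pvSet2 dp i j v) := by
  refine ⟨by simp [pvSet2, h.1], ?_⟩
  intro r hr
  rcases List.mem_or_eq_of_mem_set hr with hr' | rfl
  · exact h.2 _ hr'
  · rw [List.length_set]; exact pvRow_len h hi

theorem pvGet2_set {m k : Nat} {dp : List (List Int)} (h : pvShape m k dp) {i j : Nat}
    (hi : i ≤ m) (hj : j ≤ k) (v : Int) (i' j' : Nat) :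
    pvGet2 (pvSet2 dp i j v) i' j' = if i' = i ∧ j' = j then v else pvGet2 dp i' j' := by
  have hlt : i < dp.length := by rw [h.1]; omega
  unfold pvGet2 pvSet2
  by_cases hii : i' = i
  · subst hii
    rw [pvGetD_set_self dp i' _ [] hlt]
    by_cases hjj : j' = j
    · subst hjj
      have hjlt : j' < (dp.getD i' []).length := by rw [pvRow_len h hi]; omega
      rw [if_pos ⟨rfl, rfl⟩, pvGetD_set_self _ j' v 0 hjlt]
    · rw [if_neg (by tauto), pvGetD_set_ne _ v 0 (by omega : j ≠ j')]
  · rw [if_neg (by tauto), pvGetD_set_ne dp _ [] (by omega : i ≠ i')]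

-- the table borders/filled region after processing rows 1..a of the main double loop
def pvF (s t : List Char) (a i j : Nat) : Int :=
  if i = 0 then (s.length : Int) else if j = 0 then (i : Int)
  else if i ≤ a then pvD s t i j else 0

theorem pvF_diag (s t : List Char) {a i : Nat} (j : Nat) (hi : i ≤ a) :
    pvF s t a i j = pvD s t i j := by
  unfold pvF
  rcases i with _ | i'
  · simp [pvD]
  · rcases j with _ | j'
    · simp [pvD]
    · simp [hi]

theorem pvStage1 (m k : Nat) : ∀ r, r ≤ m + 1 →
    pvShape m k ((List.range r).foldl (fun dp i => pvSet2 dp i 0 (i : Int))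
      (List.replicate (m + 1) (List.replicate (k + 1) (0 : Int)))) ∧
    ∀ i ≤ m, ∀ j ≤ k, pvGet2 ((List.range r).foldl (fun dp i => pvSet2 dp i 0 (i : Int))
      (List.replicate (m + 1) (List.replicate (k + 1) (0 : Int)))) i j =
      if j = 0 ∧ i < r then (i : Int) else 0 := by
  intro r
  induction r with
  | zero =>
    intro _
    constructor
    · exact ⟨by simp, by intro r hr; simp_all [List.eq_of_mem_replicate hr]⟩
    · intro i hi j hj
      simp [pvGet2, List.getD_eq_getElem?_getD, Nat.lt_succ_of_le hi, Nat.lt_succ_of_le hj]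
  | succ r ih =>
    intro hr
    obtain ⟨hsh, hent⟩ := ih (by omega)
    rw [List.range_succ, List.foldl_append, List.foldl_cons, List.foldl_nil]
    refine ⟨pvShape_set hsh (by omega) _ _, ?_⟩
    intro i hi j hj
    rw [pvGet2_set hsh (by omega) (by omega) _ i j, hent i hi j hj]
    split_ifs <;> simp_all <;> omega

theorem pvStage2 (s t : List Char) : ∀ r, r ≤ t.length + 1 →
    pvShape s.length t.length ((List.range r).foldl (fun dp j => pvSet2 dp 0 j (s.length : Int))
      ((List.range (s.length + 1)).foldl (fun dp i => pvSet2 dp i 0 (i : Int))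
        (List.replicate (s.length + 1) (List.replicate (t.length + 1) (0 : Int))))) ∧
    ∀ i ≤ s.length, ∀ j ≤ t.length,
      pvGet2 ((List.range r).foldl (fun dp j => pvSet2 dp 0 j (s.length : Int))
        ((List.range (s.length + 1)).foldl (fun dp i => pvSet2 dp i 0 (i : Int))
          (List.replicate (s.length + 1) (List.replicate (t.length + 1) (0 : Int))))) i j =
      if i = 0 ∧ j < r then (s.length : Int)
      else if j = 0 then (i : Int) else 0 := by
  intro r
  induction r with
  | zero =>
    intro _
    obtain ⟨hsh, hent⟩ := pvStage1 s.length t.length (s.length + 1) le_rfl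
    refine ⟨hsh, ?_⟩
    intro i hi j hj
    rw [List.range_zero, List.foldl_nil, hent i hi j hj]
    split_ifs <;> simp_all
  | succ r ih =>
    intro hr
    obtain ⟨hsh, hent⟩ := ih (by omega)
    rw [show List.range (r + 1) = List.range r ++ [r] from List.range_succ,
      List.foldl_append, List.foldl_cons, List.foldl_nil]
    refine ⟨pvShape_set hsh (by omega) _ _, ?_⟩
    intro i hi j hj
    rw [pvGet2_set hsh (by omega) (by omega) _ i j, hent i hi j hj]
    split_ifs <;> simp_all <;> omega

theorem pvInner (s t : List Char) (a : Nat) (ha : a < s.length) :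
    ∀ b, b ≤ t.length → ∀ dp, pvShape s.length t.length dp →
    (∀ i ≤ s.length, ∀ j ≤ t.length, pvGet2 dp i j = pvF s t a i j) →
    pvShape s.length t.length ((List.range' 1 b).foldl (fun dp j =>
      pvSet2 dp (1 + a) j (min (min (pvGet2 dp (1 + a - 1) j + 1) (pvGet2 dp (1 + a) (j - 1) + 1))
        (pvGet2 dp (1 + a - 1) (j - 1) +
          if s.getD (1 + a - 1) ' ' = t.getD (j - 1) ' ' then 1 else 0))) dp) ∧
    ∀ i ≤ s.length, ∀ j ≤ t.length,
      pvGet2 ((List.range' 1 b).foldl (fun dp j =>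
        pvSet2 dp (1 + a) j (min (min (pvGet2 dp (1 + a - 1) j + 1) (pvGet2 dp (1 + a) (j - 1) + 1))
          (pvGet2 dp (1 + a - 1) (j - 1) +
            if s.getD (1 + a - 1) ' ' = t.getD (j - 1) ' ' then 1 else 0))) dp) i j =
      if i = a + 1 ∧ 1 ≤ j ∧ j ≤ b then pvD s t i j else pvF s t a i j := by
  intro b
  induction b with
  | zero =>
    intro _ dp hsh hent
    refine ⟨by simpa using hsh, ?_⟩
    intro i hi j hj
    rw [List.range'_zero, List.foldl_nil, hent i hi j hj]
    split_ifs with h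
    · omega
    · rfl
  | succ b ih =>
    intro hb dp hsh hent
    obtain ⟨hsh', hent'⟩ := ih (by omega) dp hsh hent
    rw [List.range'_1_concat, List.foldl_append, List.foldl_cons, List.foldl_nil]
    set L := (List.range' 1 b).foldl (fun dp j =>
      pvSet2 dp (1 + a) j (min (min (pvGet2 dp (1 + a - 1) j + 1) (pvGet2 dp (1 + a) (j - 1) + 1))
        (pvGet2 dp (1 + a - 1) (j - 1) +
          if s.getD (1 + a - 1) ' ' = t.getD (j - 1) ' ' then 1 else 0))) dp with hLdef
    refine ⟨pvShape_set hsh' (by omega) _ _, ?_⟩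
    intro i hi j hj
    rw [pvGet2_set hsh' (by omega) (by omega) _ i j]
    by_cases hij : i = 1 + a ∧ j = 1 + b
    · obtain ⟨rfl, rfl⟩ := hij
      rw [if_pos ⟨rfl, rfl⟩]
      have e1 : pvGet2 L (1 + a - 1) (1 + b) = pvD s t a (b + 1) := by
        rw [show 1 + a - 1 = a from by omega, show 1 + b = b + 1 from by omega,
          hent' a (by omega) (b + 1) (by omega), if_neg (by omega), pvF_diag s t (b + 1) le_rfl]
      have e2 : pvGet2 L (1 + a) (1 + b - 1) = pvD s t (a + 1) b := by
        rw [show 1 + a = a + 1 from by omega, show 1 + b - 1 = b from by omega,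
          hent' (a + 1) (by omega) b (by omega)]
        rcases Nat.eq_zero_or_pos b with rfl | hb0
        · rw [if_neg (by omega)]; simp [pvF, pvD]
        · rw [if_pos (by omega)]
      have e3 : pvGet2 L (1 + a - 1) (1 + b - 1) = pvD s t a b := by
        rw [show 1 + a - 1 = a from by omega, show 1 + b - 1 = b from by omega,
          hent' a (by omega) b (by omega), if_neg (by omega), pvF_diag s t b le_rfl]
      rw [e1, e2, e3, if_pos (show (1 + a = a + 1 ∧ 1 ≤ 1 + b ∧ 1 + b ≤ b + 1) from by omega)]
      rw [show 1 + a - 1 = a from by omega, show 1 + b - 1 = b from by omega,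
        show 1 + a = a + 1 from by omega, show 1 + b = b + 1 from by omega]
      have hrec : pvD s t (a + 1) (b + 1) = min (min (pvD s t a (b + 1) + 1) (pvD s t (a + 1) b + 1))
          (pvD s t a b + if s.getD a ' ' = t.getD b ' ' then 1 else 0) := by rw [pvD]
      rw [hrec]
    · rw [if_neg hij, hent' i hi j hj]
      split_ifs <;> first | rfl | omega

theorem pvOuter (s t : List Char) : ∀ a, a ≤ s.length →
    pvShape s.length t.length ((List.range' 1 a).foldl (fun dp i =>
      (List.range' 1 t.length).foldl (fun dp j =>
        pvSet2 dp i j (min (min (pvGet2 dp (i - 1) j + 1) (pvGet2 dp i (j - 1) + 1))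
          (pvGet2 dp (i - 1) (j - 1) +
            if s.getD (i - 1) ' ' = t.getD (j - 1) ' ' then 1 else 0))) dp)
      ((List.range (t.length + 1)).foldl (fun dp j => pvSet2 dp 0 j (s.length : Int))
        ((List.range (s.length + 1)).foldl (fun dp i => pvSet2 dp i 0 (i : Int))
          (List.replicate (s.length + 1) (List.replicate (t.length + 1) (0 : Int)))))) ∧
    ∀ i ≤ s.length, ∀ j ≤ t.length,
      pvGet2 ((List.range' 1 a).foldl (fun dp i =>
        (List.range' 1 t.length).foldl (fun dp j =>
          pvSet2 dp i j (min (min (pvGet2 dp (i - 1) j + 1) (pvGet2 dp i (j - 1) + 1))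
            (pvGet2 dp (i - 1) (j - 1) +
              if s.getD (i - 1) ' ' = t.getD (j - 1) ' ' then 1 else 0))) dp)
        ((List.range (t.length + 1)).foldl (fun dp j => pvSet2 dp 0 j (s.length : Int))
          ((List.range (s.length + 1)).foldl (fun dp i => pvSet2 dp i 0 (i : Int))
            (List.replicate (s.length + 1) (List.replicate (t.length + 1) (0 : Int)))))) i j =
      pvF s t a i j := by
  intro a
  induction a with
  | zero =>
    intro _
    obtain ⟨hsh, hent⟩ := pvStage2 s t (t.length + 1) le_rfl
    refine ⟨hsh, ?_⟩
    intro i hi j hj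
    rw [List.range'_zero, List.foldl_nil, hent i hi j hj]
    unfold pvF
    split_ifs <;> simp_all
  | succ a ih =>
    intro ha
    obtain ⟨hsh, hent⟩ := ih (by omega)
    rw [List.range'_1_concat, List.foldl_append, List.foldl_cons, List.foldl_nil]
    obtain ⟨hsh', hent'⟩ := pvInner s t a (by omega) t.length le_rfl _ hsh hent
    refine ⟨hsh', ?_⟩
    intro i hi j hj
    rw [hent' i hi j hj]
    unfold pvF
    split_ifs <;> first | rfl | omega

theorem edit_distance_eq (s t : List Char) (md : Int) :
    edit_distance s t md = pvD s t s.length t.length := by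
  unfold edit_distance
  obtain ⟨_, hent⟩ := pvOuter s t s.length le_rfl
  rw [hent s.length le_rfl t.length le_rfl, pvF_diag s t t.length le_rfl]

-- ===== VERDICT (by name: the statement is the Claim_ definition above) =====
theorem approx_match_spec : Claim_equal_approx_match := by
  intro text pattern max_dist _
  show _ = _
  unfold approx_match approx_match_alt
  simp only []
  rw [PySem.List.foldl_append_ite]
  simp [edit_distance_eq, pvDist_eq]
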